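-- pv_equiv track=rewrite | github.com/taozhe1036/BN | factor_graph.py | expand_parameters
-- ===== SOURCE A (Python) =====
-- def expand_parameters(args, vals):
--     '''
--     Given a list of args and values
--     we return a list of tuples
--     containing all possible n length
--     sequences of vals where n is the
--     length of args.
--     '''
--
--     result = []
--     if not args:
--         return [result]
--     rest = expand_parameters(args[1:], vals)
--     for r in rest:
--         result.append([True] + r)
--         result.append([False] + r)
--     return result
-- ===== SOURCE B (Python) =====
-- def expand_parameters(args, vals):
--     # Iterative version: start from [[]] and grow front-first, one level per arg.
--     result = [[]]
--     for _ in args: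
--         new = []
--         for r in result:
--             new.append([True] + r)
--             new.append([False] + r)
--         result = new
--     return result
-- ===== Notes on version B (the rewrite author's own statement) =====
-- stated objective: simpler
-- what changed: Replaced the recursion on args with an explicit iterative loop that repeatedly expands an accumulator starting from [[]].
import Mathlib
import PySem

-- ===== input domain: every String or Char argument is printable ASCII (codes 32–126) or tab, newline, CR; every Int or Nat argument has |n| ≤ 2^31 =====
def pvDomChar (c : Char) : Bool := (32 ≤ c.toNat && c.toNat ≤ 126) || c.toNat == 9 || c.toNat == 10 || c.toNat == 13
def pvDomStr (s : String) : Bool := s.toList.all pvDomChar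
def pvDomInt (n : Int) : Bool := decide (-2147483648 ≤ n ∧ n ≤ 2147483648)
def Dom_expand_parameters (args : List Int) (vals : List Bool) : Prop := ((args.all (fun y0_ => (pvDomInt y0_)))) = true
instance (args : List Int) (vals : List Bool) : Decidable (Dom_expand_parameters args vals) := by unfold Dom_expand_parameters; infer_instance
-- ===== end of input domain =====

-- B replaces A's recursion on args with an explicit iterative loop from [[]]; objective: simpler.
-- ===== PORT A =====
def expand_parameters (args : List Int) (vals : List Bool) : List (List Bool) :=
  match args with
  | [] => [[]]
  | _ :: tl =>
    let rest := expand_parameters tl vals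
    rest.foldl (fun result r => result ++ [true :: r, false :: r]) []

-- ===== PORT B =====
def expand_parameters_alt (args : List Int) (vals : List Bool) : List (List Bool) :=
  args.foldl
    (fun result _ => result.foldl (fun new r => new ++ [true :: r, false :: r]) [])
    [[]]

-- ===== PRECONDITION & SPEC =====
def Spec_expand_parameters (args : List Int) (vals : List Bool) (out : List (List Bool)) : Prop := out = expand_parameters_alt args vals
instance (args : List Int) (vals : List Bool) (out : List (List Bool)) : Decidable (Spec_expand_parameters args vals out) := by unfold Spec_expand_parameters; infer_instance

-- ===== CLAIM (what is proved, stated in full; the proofs are below) =====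
def Claim_equal_expand_parameters : Prop := ∀ (args : List Int) (vals : List Bool), Dom_expand_parameters args vals → Spec_expand_parameters args vals (expand_parameters args vals)

-- ===== LEMMAS AND PROOFS =====
-- One expansion step (what A applies once per recursion level and B once per loop iteration).
def pvStep (l : List (List Bool)) : List (List Bool) :=
  l.foldl (fun new r => new ++ [true :: r, false :: r]) []

-- B's loop commutes with one step of pre-processing of the accumulator.
theorem pvFoldl_step_comm (l : List Int) (init : List (List Bool)) :
    l.foldl (fun result (_ : Int) => pvStep result) (pvStep init)
      = pvStep (l.foldl (fun result (_ : Int) => pvStep result) init) := by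
  induction l generalizing init with
  | nil => rfl
  | cons a tl ih => simpa [List.foldl] using ih (pvStep init)

theorem pvAB (args : List Int) (vals : List Bool) :
    expand_parameters args vals = expand_parameters_alt args vals := by
  induction args with
  | nil => rfl
  | cons a tl ih =>
    simp only [expand_parameters, expand_parameters_alt, List.foldl] at *
    rw [ih]
    exact (pvFoldl_step_comm tl [[]]).symm

-- ===== VERDICT (by name: the statement is the Claim_ definition above) =====
theorem expand_parameters_spec : Claim_equal_expand_parameters := by
  intro args vals _
  exact pvAB args vals
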